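-- pv_equiv track=rewrite | github.com/Relaxed-System-Lab/AtmosSci-Bench | src/evaluate/utils.py | deduplicate_expected_answers
-- ===== SOURCE A (Python) =====
-- def deduplicate_expected_answers(expected_answers):
--     """
--     Deduplicate expected answers by removing redundant entries with the same answer.
--
--     Args:
--         expected_answers (dict): Dictionary mapping subquestion IDs to expected answers
--
--     Returns:
--         dict: Deduplicated dictionary of expected answers
--     """
--     if not expected_answers:
--         return {}
--
--     # Create a reverse mapping from answers to IDs
--     answer_to_ids = {}
--     for subq_id, answer in expected_answers.items():
--         if answer not in answer_to_ids:
--             answer_to_ids[answer] = []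
--         answer_to_ids[answer].append(subq_id)
--
--     # Create a deduplicated dictionary
--     deduplicated = {}
--
--     # Process each unique answer
--     for answer, ids in answer_to_ids.items():
--         # If there's only one ID for this answer, keep it as is
--         if len(ids) == 1:
--             deduplicated[ids[0]] = answer
--         else:
--             # If there are multiple IDs with the same answer, prioritize 'main' or the first alphabetical ID
--             if 'main' in ids:
--                 deduplicated['main'] = answer
--             else:
--                 # Sort IDs alphabetically and keep the first one
--                 ids.sort()
--                 deduplicated[ids[0]] = answer
--
--     # If there's only one answer in the deduplicated dictionary and it has the key 'main',
--     # change the key to 'a' as requested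
--     if len(deduplicated) == 1 and 'main' in deduplicated:
--         answer = deduplicated.pop('main')
--         deduplicated['a'] = answer
--
--     return deduplicated
-- ===== SOURCE B (Python) =====
-- def deduplicate_expected_answers(expected_answers):
--     """Single pass: keep, for each distinct answer, a running best id
--     ('main' beats everything, otherwise the alphabetically smallest)."""
--     best_by_answer = {}
--     for subq_id, answer in expected_answers.items():
--         cur = best_by_answer.get(answer)
--         if cur is None:
--             best_by_answer[answer] = subq_id
--         elif cur != 'main':
--             best_by_answer[answer] = 'main' if subq_id == 'main' else min(cur, subq_id)
--     deduplicated = {best_id: answer for answer, best_id in best_by_answer.items()}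
--     if len(deduplicated) == 1 and 'main' in deduplicated:
--         deduplicated = {'a': deduplicated['main']}
--     return deduplicated
-- ===== Notes on version B (the rewrite author's own statement) =====
-- stated objective: simpler
-- what changed: Replaces the two-phase grouping (answer -> list of all ids, then a length/membership/sort decision per group) by a single pass that keeps one running best id per answer ('main' absorbs, otherwise the smaller string), so the per-answer id lists and the in-group sort disappear.
import Mathlib
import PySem

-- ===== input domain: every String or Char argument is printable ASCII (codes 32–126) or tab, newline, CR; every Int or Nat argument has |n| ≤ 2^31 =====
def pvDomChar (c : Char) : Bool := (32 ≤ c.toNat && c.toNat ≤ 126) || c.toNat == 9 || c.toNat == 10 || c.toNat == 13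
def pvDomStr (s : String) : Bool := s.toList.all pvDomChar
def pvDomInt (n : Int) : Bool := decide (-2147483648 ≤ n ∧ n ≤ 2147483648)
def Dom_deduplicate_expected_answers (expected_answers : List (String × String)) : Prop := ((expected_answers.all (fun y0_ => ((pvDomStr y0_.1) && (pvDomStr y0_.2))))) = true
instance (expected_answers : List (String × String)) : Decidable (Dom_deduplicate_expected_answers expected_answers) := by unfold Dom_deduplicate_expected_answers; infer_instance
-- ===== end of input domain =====

-- B replaces A's two-phase grouping (answer -> list of ids, then length/membership/sort per group)
-- by a single pass keeping one running best id per answer; objective: simpler (no group lists, no sort).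


-- ===== PORT A =====
def deduplicate_expected_answers (expected_answers : List (String × String)) : List (String × String) :=
  if expected_answers.isEmpty then [] else
  -- answer_to_ids: reverse mapping answer -> list of ids
  let answer_to_ids : PySem.Dict String (List String) :=
    expected_answers.foldl (fun d p =>
      let d := if d.contains p.2 then d else d.insert p.2 ([] : List String)
      d.modify p.2 [] (fun l => l ++ [p.1])) PySem.Dict.empty
  let deduplicated : PySem.Dict String String :=
    answer_to_ids.items.foldl (fun d q =>
      if q.2.length == 1 then
        d.insert (q.2.headD "") q.1       -- ids[0]; exact: the branch guarantees ids is a singleton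
      else if q.2.contains "main" then
        d.insert "main" q.1
      else
        d.insert ((PySem.List.sorted q.2 (fun x => x) false).headD "") q.1  -- ids.sort(); ids[0]; exact: ids nonempty here
      ) PySem.Dict.empty
  let deduplicated :=
    if deduplicated.size == 1 && deduplicated.contains "main" then
      match deduplicated.pop? "main" with
      | some (ans, d') => d'.insert "a" ans
      | none => deduplicated   -- unreachable: 'contains "main"' holds in this branch
    else deduplicated
  deduplicated.items

-- ===== PORT B =====
def deduplicate_expected_answers_alt (expected_answers : List (String × String)) : List (String × String) :=
  let best_by_answer : PySem.Dict String String :=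
    expected_answers.foldl (fun d p =>
      match d.get? p.2 with
      | none => d.insert p.2 p.1
      | some cur =>
          if cur == "main" then d
          else d.insert p.2 (if p.1 == "main" then "main" else min cur p.1)) PySem.Dict.empty
  let deduplicated : PySem.Dict String String :=
    best_by_answer.items.foldl (fun d q => d.insert q.2 q.1) PySem.Dict.empty
  let deduplicated :=
    if deduplicated.size == 1 && deduplicated.contains "main" then
      PySem.Dict.empty.insert "a" (deduplicated.getD "main" "")  -- {'a': deduplicated['main']}; exact: 'main' is present here
    else deduplicated
  deduplicated.items

-- ===== PRECONDITION & SPEC =====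
def Spec_deduplicate_expected_answers (expected_answers : List (String × String)) (out : List (String × String)) : Prop := out = deduplicate_expected_answers_alt expected_answers
instance (expected_answers : List (String × String)) (out : List (String × String)) : Decidable (Spec_deduplicate_expected_answers expected_answers out) := by unfold Spec_deduplicate_expected_answers; infer_instance

-- ===== CLAIM (what is proved, stated in full; the proofs are below) =====
def Claim_equal_deduplicate_expected_answers : Prop := ∀ (expected_answers : List (String × String)), Dom_deduplicate_expected_answers expected_answers → Spec_deduplicate_expected_answers expected_answers (deduplicate_expected_answers expected_answers)

-- ===== LEMMAS AND PROOFS =====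

-- the single-pass combination rule of B
def pvMix (cur id : String) : String :=
  if cur == "main" then "main" else if id == "main" then "main" else min cur id

-- A's per-group choice, read off from its second loop
def pvChooseA (ids : List String) : String :=
  if ids.length == 1 then ids.headD ""
  else if ids.contains "main" then "main"
  else (PySem.List.sorted ids (fun x => x) false).headD ""

-- B's per-group choice: fold of pvMix over the group's ids
def pvChooseB : List String → String
  | [] => ""
  | h :: t => t.foldl pvMix h

-- ids carrying a given answer, in input order
def pvIds (xs : List (String × String)) (a : String) : List String :=
  (xs.filter (fun p => p.2 == a)).map (fun p => p.1)

-- A's grouping step is a plain modify-append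
theorem stepA1_eq (d : PySem.Dict String (List String)) (p : String × String) :
    (let d1 := if d.contains p.2 then d else d.insert p.2 ([] : List String)
     d1.modify p.2 [] (fun l => l ++ [p.1]))
    = d.modify p.2 [] (fun l => l ++ [p.1]) := by
  by_cases h : d.contains p.2
  · simp [h]
  · simp only [Bool.not_eq_true] at h
    simp only [h, Bool.false_eq_true, if_false, PySem.Dict.modify,
      PySem.Dict.getD_insert_self, PySem.Dict.insert_insert_self,
      PySem.Dict.getD_of_not_contains d _ h]

-- what B's first loop stores for one answer, as a function of that answer's ids
def pvGfold : Option String → List String → Option String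
  | o, [] => o
  | none, id :: t => pvGfold (some id) t
  | some cur, id :: t => pvGfold (some (pvMix cur id)) t

theorem pvGfold_some (t : List String) : ∀ c, pvGfold (some c) t = some (t.foldl pvMix c) := by
  induction t with
  | nil => intro c; rfl
  | cons y t ih => intro c; simpa [pvGfold] using ih (pvMix c y)

-- B's first loop, pointwise
theorem B_get? (xs : List (String × String)) :
    ∀ (d : PySem.Dict String String) (a : String),
    (xs.foldl (fun d p =>
      match d.get? p.2 with
      | none => d.insert p.2 p.1
      | some cur =>
          if cur == "main" then d
          else d.insert p.2 (if p.1 == "main" then "main" else min cur p.1)) d).get? a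
    = pvGfold (d.get? a) (pvIds xs a) := by
  induction xs with
  | nil => intro d a; rfl
  | cons p xs ih =>
    intro d a
    rcases hg : d.get? p.2 with _ | cur
    · simp only [List.foldl_cons, hg]
      rw [ih]
      by_cases ha : p.2 = a
      · subst ha
        rw [PySem.Dict.get?_insert_self, hg]
        simp [pvIds, pvGfold]
      · rw [PySem.Dict.get?_insert_of_ne _ _ (fun h => ha h.symm)]
        simp [pvIds, show (p.2 == a) = false from by simpa using ha]
    · by_cases hm : cur = "main"
      · subst hm
        simp only [List.foldl_cons, hg, beq_self_eq_true, if_pos]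
        rw [ih]
        by_cases ha : p.2 = a
        · subst ha
          rw [hg]; simp [pvIds, pvGfold, pvMix]
        · simp [pvIds, show (p.2 == a) = false from by simpa using ha]
      · simp only [List.foldl_cons, hg]
        rw [if_neg (by simp [hm] : ¬ ((cur == "main") = true))]
        rw [ih]
        by_cases ha : p.2 = a
        · subst ha
          rw [PySem.Dict.get?_insert_self, hg]
          simp [pvIds, pvGfold, pvMix, hm]
        · rw [PySem.Dict.get?_insert_of_ne _ _ (fun h => ha h.symm)]
          simp [pvIds, show (p.2 == a) = false from by simpa using ha]

-- B's first loop: key set = the distinct answers, in first-occurrence order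
theorem B_keys (xs : List (String × String)) :
    ∀ (d : PySem.Dict String String),
    (xs.foldl (fun d p =>
      match d.get? p.2 with
      | none => d.insert p.2 p.1
      | some cur =>
          if cur == "main" then d
          else d.insert p.2 (if p.1 == "main" then "main" else min cur p.1)) d).keys
    = PySem.Set.update d.keys (xs.map (fun p => p.2)) := by
  induction xs with
  | nil => intro d; rfl
  | cons p xs ih =>
    intro d
    rcases hg : d.get? p.2 with _ | cur
    · have hc : d.contains p.2 = false := by
        rw [PySem.Dict.contains_eq_isSome_get?, hg]; rfl
      simp only [List.foldl_cons, hg, List.map_cons, PySem.Set.update_cons]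
      rw [ih, PySem.Dict.keys_insert_of_not_contains _ _ hc,
        PySem.Set.add_of_not_mem (by
          intro hmem
          exact absurd (PySem.Dict.contains_iff_mem_keys d p.2 |>.2 hmem) (by simp [hc]))]
    · have hc : d.contains p.2 = true := by
        rw [PySem.Dict.contains_eq_isSome_get?, hg]; rfl
      have hmem : p.2 ∈ d.keys := PySem.Dict.contains_iff_mem_keys d p.2 |>.1 hc
      by_cases hm : cur = "main"
      · subst hm
        simp only [List.foldl_cons, hg, beq_self_eq_true, if_pos, List.map_cons,
          PySem.Set.update_cons]
        rw [ih, PySem.Set.add_of_mem hmem]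
      · simp only [List.foldl_cons, hg, List.map_cons, PySem.Set.update_cons]
        rw [if_neg (by simp [hm] : ¬ ((cur == "main") = true))]
        rw [ih, PySem.Dict.keys_insert_of_contains _ _ hc, PySem.Set.add_of_mem hmem]

theorem foldl_mix_absorb (t : List String) : t.foldl pvMix "main" = "main" := by
  induction t with
  | nil => rfl
  | cons y t ih => simpa [pvMix] using ih

theorem foldl_mix_main (t : List String) : ∀ h, "main" ∈ h :: t → t.foldl pvMix h = "main" := by
  induction t with
  | nil => intro h hm; simp at hm; exact hm.symm
  | cons y t ih =>
    intro h hm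
    by_cases hh : h = "main"
    · subst hh
      simpa [pvMix] using foldl_mix_absorb t
    · have : "main" ∈ y :: t := by
        rcases List.mem_cons.1 hm with h1 | h1
        · exact absurd h1.symm hh
        · exact h1
      rcases List.mem_cons.1 this with h1 | h1
      · subst h1
        simp only [List.foldl_cons]
        have : pvMix h "main" = "main" := by simp [pvMix]
        rw [this]
        exact foldl_mix_absorb t
      · exact ih (pvMix h y) (List.mem_cons_of_mem _ h1)

theorem foldl_mix_no_main (t : List String) :
    ∀ h, "main" ∉ h :: t → t.foldl pvMix h = t.foldl min h := by
  induction t with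
  | nil => intro h _; rfl
  | cons y t ih =>
    intro h hm
    have hh : h ≠ "main" := fun e => hm (by simp [e])
    have hy : y ≠ "main" := fun e => hm (by simp [e])
    have hmix : pvMix h y = min h y := by
      simp [pvMix, hh, hy]
    simp only [List.foldl_cons, hmix]
    apply ih
    intro hmem
    rcases List.mem_cons.1 hmem with h1 | h1
    · rcases min_choice h y with e | e <;> rw [e] at h1
      · exact hh h1.symm
      · exact hy h1.symm
    · exact hm (by simp [h1])

-- on a nonempty group, A's choice and B's running best agree
theorem choose_eq (ids : List String) (hne : ids ≠ []) : pvChooseA ids = pvChooseB ids := by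
  obtain ⟨h, t, rfl⟩ := List.exists_cons_of_ne_nil hne
  rcases t with _ | ⟨y, t⟩
  · by_cases hh : h = "main" <;> simp [pvChooseA, pvChooseB, hh]
  · have hlen : ((h :: y :: t).length == 1) = false := by simp
    by_cases hm : "main" ∈ h :: y :: t
    · have hc : (h :: y :: t).contains "main" = true := by simpa using hm
      simp only [pvChooseA, pvChooseB, hlen, Bool.false_eq_true, if_false, hc, if_pos]
      exact (foldl_mix_main _ _ hm).symm
    · have hc : (h :: y :: t).contains "main" = false := by simpa using hm
      simp only [pvChooseA, pvChooseB, hlen, Bool.false_eq_true, if_false, hc, if_false]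
      rw [foldl_mix_no_main _ _ hm]
      have hsne : PySem.List.sorted (h :: y :: t) (fun x => x) false ≠ [] := by
        rw [Ne, PySem.List.sorted_eq_nil_iff]; simp
      obtain ⟨m, t', e⟩ := List.exists_cons_of_ne_nil hsne
      have hmle : ∀ z ∈ h :: y :: t, m ≤ z := by
        intro z hz
        exact PySem.List.key_head_sorted_le _ (fun x => x) e z hz
      have hmmem : m ∈ h :: y :: t := by
        rw [← PySem.List.mem_sorted (h :: y :: t) (fun x => x) false, e]; simp
      have hF := PySem.List.foldl_min_le (y :: t) h
      have hFmem := PySem.List.foldl_min_mem (y :: t) h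
      have h1 : m ≤ (y :: t).foldl min h := by
        rcases hFmem with e1 | e1
        · rw [e1]; exact hmle h (by simp)
        · exact hmle _ (List.mem_cons_of_mem _ e1)
      have h2 : (y :: t).foldl min h ≤ m := by
        rcases List.mem_cons.1 hmmem with e1 | e1
        · rw [e1]; exact hF.1
        · exact hF.2 m e1
      rw [e]
      simpa using le_antisymm h1 h2

-- A's grouping dict, fully characterised
theorem A_group_items (xs : List (String × String)) :
    (xs.foldl (fun d p =>
        let d := if d.contains p.2 then d else d.insert p.2 ([] : List String)
        d.modify p.2 [] (fun l => l ++ [p.1])) PySem.Dict.empty).items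
    = (PySem.Set.ofList (xs.map (fun p => p.2))).map (fun a => (a, pvIds xs a)) := by
  have hstep : (fun (d : PySem.Dict String (List String)) (p : String × String) =>
      let d := if d.contains p.2 then d else d.insert p.2 ([] : List String)
      d.modify p.2 [] (fun l => l ++ [p.1]))
      = (fun d p => d.modify p.2 [] (fun l => l ++ [p.1])) :=
    funext fun d => funext fun p => stepA1_eq d p
  rw [hstep]
  have hmap : xs.foldl (fun (d : PySem.Dict String (List String)) p => d.modify p.2 [] (fun l => l ++ [p.1])) PySem.Dict.empty
      = (xs.map Prod.swap).foldl (fun d q => d.modify q.1 [] (fun l => l ++ [q.2])) PySem.Dict.empty := by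
    rw [List.foldl_map]; rfl
  rw [hmap]
  set G := (xs.map Prod.swap).foldl (fun d q => d.modify q.1 [] (fun l => l ++ [q.2])) PySem.Dict.empty with hG
  have hkeys : G.keys = PySem.Set.ofList (xs.map (fun p => p.2)) := by
    rw [hG, PySem.Dict.keys_foldl_modify_key (xs.map Prod.swap) (fun q => q.1) []
      (fun _ q => (fun l => l ++ [q.2]))]
    have h1 : ((fun (q : String × String) => q.1) ∘ Prod.swap) = (fun (p : String × String) => p.2) := rfl
    rw [List.map_map, h1]
    exact PySem.Set.update_empty _
  have hnd : G.keys.Nodup := by rw [hkeys]; exact PySem.Set.nodup_ofList _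
  have hgetD : ∀ a, G.getD a [] = pvIds xs a := by
    intro a
    rw [hG, PySem.Dict.getD_foldl_modify_append]
    simp [pvIds, List.filter_map, List.map_map]
    rfl
  rw [PySem.Dict.items_eq_map_keys G hnd [], hkeys]
  exact List.map_congr_left (fun a _ => by rw [hgetD a])

theorem pvIds_ne_nil (xs : List (String × String)) (a : String)
    (ha : a ∈ PySem.Set.ofList (xs.map (fun p => p.2))) : pvIds xs a ≠ [] := by
  rw [PySem.Set.mem_ofList] at ha
  obtain ⟨p, hp, hpa⟩ := List.mem_map.1 ha
  have : p ∈ xs.filter (fun p => p.2 == a) := List.mem_filter.2 ⟨hp, by simp [hpa]⟩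
  simp only [pvIds, Ne, List.map_eq_nil_iff]
  exact List.ne_nil_of_mem this

-- B's running-best dict, fully characterised
theorem B_items (xs : List (String × String)) :
    (xs.foldl (fun d p =>
      match d.get? p.2 with
      | none => d.insert p.2 p.1
      | some cur =>
          if cur == "main" then d
          else d.insert p.2 (if p.1 == "main" then "main" else min cur p.1)) PySem.Dict.empty).items
    = (PySem.Set.ofList (xs.map (fun p => p.2))).map (fun a => (a, pvChooseB (pvIds xs a))) := by
  set B := xs.foldl (fun d p =>
      match d.get? p.2 with
      | none => d.insert p.2 p.1
      | some cur =>
          if cur == "main" then d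
          else d.insert p.2 (if p.1 == "main" then "main" else min cur p.1)) PySem.Dict.empty with hB
  have hkeys : B.keys = PySem.Set.ofList (xs.map (fun p => p.2)) := by
    rw [hB, B_keys]
    exact PySem.Set.update_empty _
  have hnd : B.keys.Nodup := by rw [hkeys]; exact PySem.Set.nodup_ofList _
  rw [PySem.Dict.items_eq_map_keys B hnd "", hkeys]
  refine List.map_congr_left (fun a ha => ?_)
  have hne := pvIds_ne_nil xs a ha
  obtain ⟨h, t, e⟩ := List.exists_cons_of_ne_nil hne
  have : B.getD a "" = pvChooseB (pvIds xs a) := by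
    rw [PySem.Dict.getD_eq_get?_getD, hB, B_get?]
    simp only [PySem.Dict.get?_empty, e, pvGfold, pvGfold_some]
    rfl
  rw [this]

-- the two deduplicated dicts (before the final rename) are equal
theorem dedup_eq (xs : List (String × String)) :
    ((xs.foldl (fun d p =>
        let d := if d.contains p.2 then d else d.insert p.2 ([] : List String)
        d.modify p.2 [] (fun l => l ++ [p.1])) PySem.Dict.empty).items.foldl (fun d q =>
      if q.2.length == 1 then d.insert (q.2.headD "") q.1
      else if q.2.contains "main" then d.insert "main" q.1
      else d.insert ((PySem.List.sorted q.2 (fun x => x) false).headD "") q.1) PySem.Dict.empty)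
    = ((xs.foldl (fun d p =>
        match d.get? p.2 with
        | none => d.insert p.2 p.1
        | some cur =>
            if cur == "main" then d
            else d.insert p.2 (if p.1 == "main" then "main" else min cur p.1)) PySem.Dict.empty).items.foldl
          (fun d q => d.insert q.2 q.1) PySem.Dict.empty) := by
  rw [A_group_items, B_items, List.foldl_map, List.foldl_map]
  have hstep : ∀ (d : PySem.Dict String String) (q : String × List String),
      (if q.2.length == 1 then d.insert (q.2.headD "") q.1
       else if q.2.contains "main" then d.insert "main" q.1
       else d.insert ((PySem.List.sorted q.2 (fun x => x) false).headD "") q.1)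
      = d.insert (pvChooseA q.2) q.1 := by
    intro d q
    unfold pvChooseA
    split_ifs <;> rfl
  apply PySem.List.foldl_congr_mem
  intro acc a ha
  rw [hstep]
  simp only []
  rw [choose_eq _ (pvIds_ne_nil xs a ha)]

-- a dict of size 1 containing "main" is exactly {"main": v}
theorem singleton_main (D : PySem.Dict String String)
    (h1 : D.size = 1) (h2 : D.contains "main" = true) :
    D = PySem.Dict.mk [("main", D.getD "main" "")] := by
  obtain ⟨items⟩ := D
  obtain ⟨q, hq⟩ : ∃ q, items = [q] := by
    rcases items with _ | ⟨q, rest⟩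
    · simp [PySem.Dict.size] at h1
    · rcases rest with _ | _
      · exact ⟨q, rfl⟩
      · simp [PySem.Dict.size, List.length] at h1
  subst hq
  have : (q.1 == "main") = true := by
    simpa [PySem.Dict.contains_mk] using h2
  have hq1 : q.1 = "main" := by simpa using this
  apply PySem.Dict.ext
  obtain ⟨k, v⟩ := q
  simp only at hq1
  subst hq1
  simp [PySem.Dict.getD_eq_get?_getD, PySem.Dict.get?_mk_cons]

theorem ports_eq (xs : List (String × String)) :
    deduplicate_expected_answers xs = deduplicate_expected_answers_alt xs := by
  rcases xs with _ | ⟨p, l⟩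
  · rfl
  · unfold deduplicate_expected_answers deduplicate_expected_answers_alt
    simp only [List.isEmpty_cons, Bool.false_eq_true, if_false]
    rw [dedup_eq]
    set D := (((p :: l).foldl (fun d p =>
        match d.get? p.2 with
        | none => d.insert p.2 p.1
        | some cur =>
            if cur == "main" then d
            else d.insert p.2 (if p.1 == "main" then "main" else min cur p.1)) PySem.Dict.empty).items.foldl
          (fun d q => d.insert q.2 q.1) PySem.Dict.empty) with hDdef
    by_cases hcond : (D.size == 1 && D.contains "main") = true
    · rw [if_pos hcond, if_pos hcond]
      obtain ⟨hc1, hc2⟩ := Bool.and_eq_true_iff.1 hcond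
      have h1 : D.size = 1 := by simpa using hc1
      have hD := singleton_main D h1 hc2
      set v := D.getD "main" "" with hv
      rw [hD]
      simp [PySem.Dict.pop?, PySem.Dict.get?, PySem.Dict.erase, PySem.Dict.insert,
        PySem.Dict.contains, PySem.Dict.empty]
    · rw [if_neg hcond, if_neg hcond]

-- ===== VERDICT (by name: the statement is the Claim_ definition above) =====
theorem deduplicate_expected_answers_spec : Claim_equal_deduplicate_expected_answers := by
  intro xs _
  unfold Spec_deduplicate_expected_answers
  exact ports_eq xs
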